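-- pv_equiv track=rewrite | github.com/JudeWells/chainsaw | src/create_features/make_2d_features.py | bounds_string_remove_gaps
-- ===== SOURCE A (Python) =====
-- def bounds_string_remove_gaps(bounds, remove_gaps):
--     new_bounds = []
--     bounds = bounds.split("|")
--     for i, b in enumerate(bounds):
--         if i!=0 and i-1 in remove_gaps:
--             continue
--         if i in remove_gaps:
--             end_seg_ix = i + 1
--             while end_seg_ix in remove_gaps:
--                 end_seg_ix += 1
--             new_start = b.split('-')[0]
--             new_end = bounds[end_seg_ix].split('-')[1]
--             new_bounds.append(f"{new_start}-{new_end}")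
--         else:
--             new_bounds.append(b)
--     return '|'.join(new_bounds)
-- ===== SOURCE B (Python) =====
-- def bounds_string_remove_gaps(bounds, remove_gaps):
--     gaps = set(remove_gaps)
--     out = []
--     pending = None  # start label of the merge run currently open, if any
--     for i, seg in enumerate(bounds.split('|')):
--         if i in gaps:
--             if pending is None:
--                 pending = seg.split('-')[0]
--         elif pending is not None:
--             out.append(pending + '-' + seg.split('-')[1])
--             pending = None
--         else:
--             out.append(seg)
--     return '|'.join(out)
-- ===== Notes on version B (the rewrite author's own statement) =====
-- stated objective: simpler
-- what changed: replaces A's lookahead merge (skip-if-previous-gap branch plus an inner while loop scanning forward for the run end) by a single forward pass with one piece of carried state (the pending start label of an open run), which emits each merged segment at the run's closing boundary instead of its opening one; no inner loop and no index arithmetic remain.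
import Mathlib
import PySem

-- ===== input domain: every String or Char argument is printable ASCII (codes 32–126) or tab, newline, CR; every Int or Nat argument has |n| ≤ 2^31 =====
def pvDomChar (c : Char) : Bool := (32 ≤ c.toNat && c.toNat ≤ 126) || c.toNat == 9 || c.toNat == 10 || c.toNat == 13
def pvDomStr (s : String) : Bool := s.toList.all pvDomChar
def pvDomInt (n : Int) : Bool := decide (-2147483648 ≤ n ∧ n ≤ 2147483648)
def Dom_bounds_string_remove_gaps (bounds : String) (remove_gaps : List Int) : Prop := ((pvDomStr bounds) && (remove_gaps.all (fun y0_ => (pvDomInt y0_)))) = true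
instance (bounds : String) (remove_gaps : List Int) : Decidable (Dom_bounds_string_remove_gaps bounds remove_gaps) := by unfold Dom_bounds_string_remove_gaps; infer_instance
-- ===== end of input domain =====

-- B replaces A's lookahead merge (inner while loop scanning forward for the run end) by a single
-- forward pass carrying the pending start label of an open run, emitting each merged segment at the
-- run's closing boundary; objective: simpler decomposition, no speed claim.

-- The `while end_seg_ix in remove_gaps: end_seg_ix += 1` loop of A.  It terminates because the
-- indices visited inside the loop are distinct members of the finite list G.
theorem pvGapMeasure_dec (G : List Int) (j : Int) (hj : j ∈ G) :
    (G.filter (fun x => decide (j + 1 ≤ x))).toFinset.card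
      < (G.filter (fun x => decide (j ≤ x))).toFinset.card := by
  apply Finset.card_lt_card
  constructor
  · intro x hx
    simp only [List.mem_toFinset, List.mem_filter, decide_eq_true_eq] at *
    exact ⟨hx.1, by omega⟩
  · intro hsub
    have := hsub (by simp [List.mem_toFinset, hj] : j ∈ (G.filter (fun x => decide (j ≤ x))).toFinset)
    simp [List.mem_toFinset] at this

def pvWhileGap (G : List Int) (j : Int) : Int :=
  if h : j ∈ G then pvWhileGap G (j + 1) else j
termination_by (G.filter (fun x => decide (j ≤ x))).toFinset.card
decreasing_by exact pvGapMeasure_dec G j h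

-- ===== PORT A =====
def bounds_string_remove_gaps (bounds : String) (remove_gaps : List Int) : String :=
  let segs := (PySem.Str.split? bounds "|").getD []          -- "|" ≠ "", so split? is some
  let newBounds := (PySem.List.enumerate segs).foldl (fun acc ib =>
    if ib.1 ≠ 0 ∧ (ib.1 - 1) ∈ remove_gaps then acc          -- continue
    else if ib.1 ∈ remove_gaps then
      let endSegIx := pvWhileGap remove_gaps (ib.1 + 1)
      -- segs[endSegIx] and .split('-')[1] raise IndexError outside Pre_; getD defaults are unreachable under Pre_
      acc ++ [PySem.List.pyGetD ((PySem.Str.split? ib.2 "-").getD []) 0 "" ++ "-" ++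
              PySem.List.pyGetD ((PySem.Str.split? (PySem.List.pyGetD segs endSegIx "") "-").getD []) 1 ""]
    else acc ++ [ib.2]) ([] : List String)
  PySem.Str.join "|" newBounds

-- ===== PORT B =====
def bounds_string_remove_gaps_alt (bounds : String) (remove_gaps : List Int) : String :=
  let gaps := PySem.Set.ofList remove_gaps
  let st := (PySem.List.enumerate ((PySem.Str.split? bounds "|").getD [])).foldl
    (fun (st : List String × Option String) ib =>
      if ib.1 ∈ gaps then
        match st.2 with
        | none => (st.1, some (PySem.List.pyGetD ((PySem.Str.split? ib.2 "-").getD []) 0 ""))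
        | some _ => st
      else
        match st.2 with
        | some p => (st.1 ++ [p ++ "-" ++ PySem.List.pyGetD ((PySem.Str.split? ib.2 "-").getD []) 1 ""], none)
        | none => (st.1 ++ [ib.2], none))
    (([] : List String), (none : Option String))
  PySem.Str.join "|" st.1

-- ===== PRECONDITION & SPEC =====
-- Pre_ holds exactly where Python A returns: every gap index below the segment count is followed by a
-- non-gap index still in range (else segs[end_seg_ix] raises IndexError), and the segment at each such
-- merge end contains '-' (else .split('-')[1] raises IndexError).
def Pre_bounds_string_remove_gaps (bounds : String) (remove_gaps : List Int) : Prop :=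
  let segs := (PySem.Str.split? bounds "|").getD []
  (∀ i ∈ List.range segs.length, (i : Int) ∈ remove_gaps →
      ∃ j ∈ List.range segs.length, i < j ∧ (j : Int) ∉ remove_gaps) ∧
  (∀ j ∈ List.range segs.length, 1 ≤ j → (j : Int) ∉ remove_gaps → ((j : Int) - 1) ∈ remove_gaps →
      2 ≤ ((PySem.Str.split? (segs.getD j "") "-").getD []).length)
instance (bounds : String) (remove_gaps : List Int) : Decidable (Pre_bounds_string_remove_gaps bounds remove_gaps) := by
  unfold Pre_bounds_string_remove_gaps; infer_instance

def pvWitness_bounds_string_remove_gaps : String × List Int := ("1-3|5-7|9-11", [0])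

def Spec_bounds_string_remove_gaps (bounds : String) (remove_gaps : List Int) (out : String) : Prop := out = bounds_string_remove_gaps_alt bounds remove_gaps
instance (bounds : String) (remove_gaps : List Int) (out : String) : Decidable (Spec_bounds_string_remove_gaps bounds remove_gaps out) := by unfold Spec_bounds_string_remove_gaps; infer_instance

-- ===== CLAIM (what is proved, stated in full; the proofs are below) =====
def Claim_equal_bounds_string_remove_gaps : Prop := ∀ (bounds : String) (remove_gaps : List Int), Dom_bounds_string_remove_gaps bounds remove_gaps → Pre_bounds_string_remove_gaps bounds remove_gaps → Spec_bounds_string_remove_gaps bounds remove_gaps (bounds_string_remove_gaps bounds remove_gaps)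

-- ===== LEMMAS AND PROOFS =====

theorem pvWhileGap_mem (G : List Int) (j : Int) (h : j ∈ G) :
    pvWhileGap G j = pvWhileGap G (j + 1) := by
  rw [pvWhileGap]; simp [h]

theorem pvWhileGap_not_mem (G : List Int) (j : Int) (h : j ∉ G) :
    pvWhileGap G j = j := by
  rw [pvWhileGap]; simp [h]

-- abbreviations for the pieces both step functions build
def pvSegStart (segs : List String) (i : Int) : String :=
  PySem.List.pyGetD ((PySem.Str.split? (PySem.List.pyGetD segs i "") "-").getD []) 0 ""
def pvSegEnd (segs : List String) (i : Int) : String :=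
  PySem.List.pyGetD ((PySem.Str.split? (PySem.List.pyGetD segs i "") "-").getD []) 1 ""

def pvStepA (segs : List String) (G : List Int) (acc : List String) (i : Int) : List String :=
  if i ≠ 0 ∧ (i - 1) ∈ G then acc
  else if i ∈ G then acc ++ [pvSegStart segs i ++ "-" ++ pvSegEnd segs (pvWhileGap G (i + 1))]
  else acc ++ [PySem.List.pyGetD segs i ""]

def pvStepB (segs : List String) (G : List Int) (st : List String × Option String) (i : Int) :
    List String × Option String :=
  if i ∈ G then
    match st.2 with
    | none => (st.1, some (pvSegStart segs i))
    | some _ => st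
  else
    match st.2 with
    | some p => (st.1 ++ [p ++ "-" ++ pvSegEnd segs i], none)
    | none => (st.1 ++ [PySem.List.pyGetD segs i ""], none)

-- the core invariant: B's streaming state at index k corresponds to A having already emitted the
-- merged segment of the open run, whose end A found by forward scan (pvWhileGap G k)
theorem pv_main (segs : List String) (G : List Int)
    (hpre : ∀ i ∈ List.range segs.length, (i : Int) ∈ G →
        ∃ j ∈ List.range segs.length, i < j ∧ (j : Int) ∉ G)
    (k : Int) (hk0 : 0 ≤ k) (hkn : k ≤ (segs.length : Int))
    (pending : Option String)
    (hinv : match pending with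
            | none => k = 0 ∨ (k - 1) ∉ G
            | some _ => 1 ≤ k ∧ (k - 1) ∈ G)
    (acc : List String) :
    ((PySem.List.pyRange k (segs.length : Int) 1).foldl (pvStepB segs G) (acc, pending)).1
      = (PySem.List.pyRange k (segs.length : Int) 1).foldl (pvStepA segs G)
          (acc ++ (match pending with
                   | none => []
                   | some p => [p ++ "-" ++ pvSegEnd segs (pvWhileGap G k)])) := by
  by_cases hlt : k < (segs.length : Int)
  · rw [PySem.List.pyRange_one_cons hlt]
    simp only [List.foldl_cons]
    by_cases hg : k ∈ G
    · cases pending with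
      | none =>
        have hcond : ¬ (k ≠ 0 ∧ (k - 1) ∈ G) := by
          rcases hinv with h0 | h1
          · exact fun hc => hc.1 h0
          · exact fun hc => h1 hc.2
        have hA : pvStepA segs G (acc ++ []) k
            = acc ++ [pvSegStart segs k ++ "-" ++ pvSegEnd segs (pvWhileGap G (k + 1))] := by
          simp [pvStepA, hcond, hg]
        have hB : pvStepB segs G (acc, none) k = (acc, some (pvSegStart segs k)) := by
          simp [pvStepB, hg]
        rw [hB, hA]
        exact pv_main segs G hpre (k + 1) (by omega) (by omega)
          (some (pvSegStart segs k)) ⟨by omega, by simpa using hg⟩ acc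
      | some p =>
        obtain ⟨hk1, hkm⟩ := hinv
        have hA : pvStepA segs G (acc ++ [p ++ "-" ++ pvSegEnd segs (pvWhileGap G k)]) k
            = acc ++ [p ++ "-" ++ pvSegEnd segs (pvWhileGap G k)] := by
          simp [pvStepA, show k ≠ 0 ∧ (k - 1) ∈ G from ⟨by omega, hkm⟩]
        have hB : pvStepB segs G (acc, some p) k = (acc, some p) := by
          simp [pvStepB, hg]
        rw [hB, hA, pvWhileGap_mem G k hg]
        exact pv_main segs G hpre (k + 1) (by omega) (by omega)
          (some p) ⟨by omega, by simpa using hg⟩ acc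
    · cases pending with
      | none =>
        have hcond : ¬ (k ≠ 0 ∧ (k - 1) ∈ G) := by
          rcases hinv with h0 | h1
          · exact fun hc => hc.1 h0
          · exact fun hc => h1 hc.2
        have hA : pvStepA segs G (acc ++ []) k = acc ++ [PySem.List.pyGetD segs k ""] := by
          simp [pvStepA, hcond, hg]
        have hB : pvStepB segs G (acc, none) k
            = (acc ++ [PySem.List.pyGetD segs k ""], none) := by
          simp [pvStepB, hg]
        rw [hB, hA]
        have := pv_main segs G hpre (k + 1) (by omega) (by omega)
          none (Or.inr (by simpa using hg)) (acc ++ [PySem.List.pyGetD segs k ""])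
        simpa using this
      | some p =>
        obtain ⟨hk1, hkm⟩ := hinv
        have hA : pvStepA segs G (acc ++ [p ++ "-" ++ pvSegEnd segs (pvWhileGap G k)]) k
            = acc ++ [p ++ "-" ++ pvSegEnd segs (pvWhileGap G k)] := by
          simp [pvStepA, show k ≠ 0 ∧ (k - 1) ∈ G from ⟨by omega, hkm⟩]
        have hB : pvStepB segs G (acc, some p) k
            = (acc ++ [p ++ "-" ++ pvSegEnd segs k], none) := by
          simp [pvStepB, hg]
        rw [hB, hA, pvWhileGap_not_mem G k hg]
        have := pv_main segs G hpre (k + 1) (by omega) (by omega)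
          none (Or.inr (by simpa using hg)) (acc ++ [p ++ "-" ++ pvSegEnd segs k])
        simpa using this
  · -- k = segs.length: the range is empty; a still-open run would contradict hpre
    have hk : k = (segs.length : Int) := by omega
    rw [PySem.List.pyRange_one_eq_nil (by omega)]
    cases pending with
    | none => simp
    | some p =>
      exfalso
      obtain ⟨hk1, hkm⟩ := hinv
      have hn1 : 1 ≤ segs.length := by omega
      have hmem : ((segs.length - 1 : Nat) : Int) ∈ G := by
        have : ((segs.length - 1 : Nat) : Int) = k - 1 := by omega
        rw [this]; exact hkm
      obtain ⟨j, hjr, hij, _⟩ := hpre (segs.length - 1) (by simp [List.mem_range]; omega) hmem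
      simp [List.mem_range] at hjr
      omega
termination_by ((segs.length : Int) - k).toNat
decreasing_by all_goals omega

-- ===== VERDICT (by name: the statement is the Claim_ definition above) =====
theorem bounds_string_remove_gaps_spec : Claim_equal_bounds_string_remove_gaps := by
  intro bounds G _hdom hpre
  show bounds_string_remove_gaps bounds G = bounds_string_remove_gaps_alt bounds G
  unfold bounds_string_remove_gaps bounds_string_remove_gaps_alt
  dsimp only
  set segs := (PySem.Str.split? bounds "|").getD [] with hsegs
  rw [PySem.List.enumerate_eq_map_pyRange segs ""]
  simp only [List.foldl_map]
  have hmem : ∀ x : Int, (x ∈ PySem.Set.ofList G) = (x ∈ G) :=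
    fun x => propext (PySem.Set.mem_ofList G x)
  have hA : (fun (acc : List String) (j : Int) =>
      (fun acc (ib : Int × String) =>
        if ib.1 ≠ 0 ∧ (ib.1 - 1) ∈ G then acc
        else if ib.1 ∈ G then
          acc ++ [PySem.List.pyGetD ((PySem.Str.split? ib.2 "-").getD []) 0 "" ++ "-" ++
                  PySem.List.pyGetD ((PySem.Str.split? (PySem.List.pyGetD segs (pvWhileGap G (ib.1 + 1)) "") "-").getD []) 1 ""]
        else acc ++ [ib.2]) acc (j, PySem.List.pyGetD segs j "")) = pvStepA segs G := by
    funext acc j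
    simp [pvStepA, pvSegStart, pvSegEnd]
  have hB : (fun (st : List String × Option String) (j : Int) =>
      (fun (st : List String × Option String) (ib : Int × String) =>
        if ib.1 ∈ PySem.Set.ofList G then
          match st.2 with
          | none => (st.1, some (PySem.List.pyGetD ((PySem.Str.split? ib.2 "-").getD []) 0 ""))
          | some _ => st
        else
          match st.2 with
          | some p => (st.1 ++ [p ++ "-" ++ PySem.List.pyGetD ((PySem.Str.split? ib.2 "-").getD []) 1 ""], none)
          | none => (st.1 ++ [ib.2], none)) st (j, PySem.List.pyGetD segs j "")) = pvStepB segs G := by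
    funext st j
    simp only [hmem]
    simp [pvStepB, pvSegStart, pvSegEnd]
  simp only [PySem.List.len_eq] at *
  rw [hA, hB]
  have := pv_main segs G hpre.1 0 (by omega) (by omega) none (Or.inl rfl) []
  simp only [List.append_nil] at this
  rw [this]
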